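-- pv_equiv track=rewrite | github.com/angelren1220/CCC | CCC_00_J2.py | rotatable
-- ===== SOURCE A (Python) =====
-- def rotatable(x):
--     a = str(x)
--     for j in range(len(a)):
--         if a[j] in ["0", "1", "8"] and a[j] != a[len(a)-j-1]:
--             return False
--         elif a[j] == "6" and a[len(a)-j-1] != "9":
--             return False
--         elif a[j] == "9" and a[len(a)-j-1] != "6":
--             return False
--         elif a[j] not in ["0", "1", "8", "6", "9"]:
--             return False
--
--     return True
-- ===== SOURCE B (Python) =====
-- ROT = {'0': '0', '1': '1', '8': '8', '6': '9', '9': '6'}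
--
-- def rotatable(x):
--     a = str(x)
--     r = []
--     for c in a:
--         if c not in ROT:
--             return False
--         r.append(ROT[c])
--     r.reverse()
--     return ''.join(r) == a
-- ===== Notes on version B (the rewrite author's own statement) =====
-- stated objective: idiomatic
-- what changed: Replaces the positional mirror-branch checks at each index pair with a single pass that maps every digit through a rotation table, then compares the reversed rotated string with the original.
import Mathlib
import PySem

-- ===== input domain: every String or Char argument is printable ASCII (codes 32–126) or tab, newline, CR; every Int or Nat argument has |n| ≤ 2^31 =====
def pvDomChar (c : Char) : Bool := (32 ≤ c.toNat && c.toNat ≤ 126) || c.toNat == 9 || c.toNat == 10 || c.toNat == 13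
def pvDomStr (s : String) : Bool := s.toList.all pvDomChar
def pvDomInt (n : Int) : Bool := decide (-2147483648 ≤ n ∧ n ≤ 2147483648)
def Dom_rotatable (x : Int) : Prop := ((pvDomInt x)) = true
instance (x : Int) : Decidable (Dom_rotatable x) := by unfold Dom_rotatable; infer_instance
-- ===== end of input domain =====

-- B replaces A's per-index mirror-branch checks with a map through a rotation
-- table followed by a whole-string reverse-and-compare (idiomatic; same cost).

-- ===== PORT A =====
-- a[j] and a[len-j-1] are always in range (0 ≤ j < len), so getD's default is never used.
def rotatable (x : Int) : Bool :=
  let a := (PySem.Int.toStr x).toList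
  let n := a.length
  (List.range n).all (fun j =>
    let c := a.getD j ' '
    let m := a.getD (n - j - 1) ' '
    if (c = '0' ∨ c = '1' ∨ c = '8') ∧ c ≠ m then false
    else if c = '6' ∧ m ≠ '9' then false
    else if c = '9' ∧ m ≠ '6' then false
    else if ¬ (c = '0' ∨ c = '1' ∨ c = '8' ∨ c = '6' ∨ c = '9') then false
    else true)

-- ===== PORT B =====
-- the ROT dict as a lookup function (none = key missing)
def rotChar (c : Char) : Option Char :=
  if c = '0' then some '0'
  else if c = '1' then some '1'
  else if c = '8' then some '8'
  else if c = '6' then some '9'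
  else if c = '9' then some '6'
  else none

-- the loop of Source B: build the list of rotated digits, early-returning none on a missing key
def buildRot : List Char → Option (List Char)
  | [] => some []
  | c :: cs =>
    match rotChar c with
    | none => none
    | some d => (buildRot cs).map (fun r => d :: r)

def rotatable_alt (x : Int) : Bool :=
  let a := (PySem.Int.toStr x).toList
  match buildRot a with
  | none => false
  | some r => r.reverse == a

-- ===== PRECONDITION & SPEC =====
def Spec_rotatable (x : Int) (out : Bool) : Prop := out = rotatable_alt x
instance (x : Int) (out : Bool) : Decidable (Spec_rotatable x out) := by unfold Spec_rotatable; infer_instance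

-- ===== CLAIM (what is proved, stated in full; the proofs are below) =====
def Claim_equal_rotatable : Prop := ∀ (x : Int), Dom_rotatable x → Spec_rotatable x (rotatable x)

-- ===== LEMMAS AND PROOFS =====

-- A's if-chain at one index pair is exactly "rotChar c returns m"
lemma branch_eq_rot (c m : Char) :
    (if (c = '0' ∨ c = '1' ∨ c = '8') ∧ c ≠ m then false
     else if c = '6' ∧ m ≠ '9' then false
     else if c = '9' ∧ m ≠ '6' then false
     else if ¬ (c = '0' ∨ c = '1' ∨ c = '8' ∨ c = '6' ∨ c = '9') then false
     else true) = decide (rotChar c = some m) := by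
  unfold rotChar
  by_cases h0 : c = '0' <;> by_cases h1 : c = '1' <;> by_cases h8 : c = '8' <;>
    by_cases h6 : c = '6' <;> by_cases h9 : c = '9' <;>
    by_cases hm : c = m <;> simp_all <;> exact eq_comm

-- buildRot succeeds with r exactly when mapping rotChar gives (map some r)
lemma buildRot_eq_some (a r : List Char) :
    buildRot a = some r ↔ a.map rotChar = r.map some := by
  induction a generalizing r with
  | nil => cases r <;> simp [buildRot]
  | cons c cs ih =>
    cases h : rotChar c with
    | none =>
      simp only [buildRot, h, List.map]
      cases r <;> simp
    | some d =>
      simp only [buildRot, h, List.map, Option.map_eq_some_iff]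
      cases r with
      | nil => simp
      | cons e r' =>
        constructor
        · rintro ⟨rr, hrr, heq⟩
          injection heq with h1 h2
          simp_all [(ih rr).mp hrr]
        · intro hh
          injection hh with h1 h2
          exact ⟨r', (ih r').mpr h2, by simp_all⟩

-- the common characterisation: both programs decide "a.map rotChar = a.reverse.map some"
lemma key (a : List Char) :
    (let n := a.length
     (List.range n).all (fun j =>
       let c := a.getD j ' '
       let m := a.getD (n - j - 1) ' '
       if (c = '0' ∨ c = '1' ∨ c = '8') ∧ c ≠ m then false
       else if c = '6' ∧ m ≠ '9' then false
       else if c = '9' ∧ m ≠ '6' then false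
       else if ¬ (c = '0' ∨ c = '1' ∨ c = '8' ∨ c = '6' ∨ c = '9') then false
       else true))
    =
    (match buildRot a with
     | none => false
     | some r => r.reverse == a) := by
  have hA : (let n := a.length
     (List.range n).all (fun j =>
       let c := a.getD j ' '
       let m := a.getD (n - j - 1) ' '
       if (c = '0' ∨ c = '1' ∨ c = '8') ∧ c ≠ m then false
       else if c = '6' ∧ m ≠ '9' then false
       else if c = '9' ∧ m ≠ '6' then false
       else if ¬ (c = '0' ∨ c = '1' ∨ c = '8' ∨ c = '6' ∨ c = '9') then false
       else true)) = decide (a.map rotChar = a.reverse.map some) := by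
    simp only [branch_eq_rot]
    rcases Bool.eq_false_or_eq_true ((List.range a.length).all fun j => decide (rotChar (a.getD j ' ') = some (a.getD (a.length - j - 1) ' '))) with h | h
    · rw [h]
      symm
      rw [decide_eq_true_iff]
      apply List.ext_getElem (by simp)
      intro j hj hj'
      have hj2 : j < a.length := by simpa using hj
      have := List.all_eq_true.mp h j (by simpa using hj2)
      simp only [decide_eq_true_iff] at this
      rw [List.getD_eq_getElem a ' ' hj2, List.getD_eq_getElem a ' ' (by omega : a.length - j - 1 < a.length)] at this
      have e : a.length - 1 - j = a.length - j - 1 := by omega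
      simp only [List.getElem_map, List.getElem_reverse, e, this]
    · rw [h]
      symm
      rw [decide_eq_false_iff_not]
      intro heq
      suffices hE : ((List.range a.length).all fun j => decide (rotChar (a.getD j ' ') = some (a.getD (a.length - j - 1) ' '))) = true by
        simp only [hE] at h
        cases h
      rw [List.all_eq_true]
      intro j hj
      have hj2 : j < a.length := by simpa using hj
      rw [decide_eq_true_iff]
      have := congrArg (fun l => l[j]?) heq
      simp only [List.getElem?_map] at this
      rw [List.getElem?_eq_getElem hj2, List.getElem?_eq_getElem (by simpa using hj2)] at this
      simp only [Option.map_some, Option.some.injEq] at this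
      rw [List.getD_eq_getElem a ' ' hj2, List.getD_eq_getElem a ' ' (by omega : a.length - j - 1 < a.length)]
      rw [this]
      have e : a.length - 1 - j = a.length - j - 1 := by omega
      simp only [List.getElem_reverse, e]
  have hB : (match buildRot a with
     | none => false
     | some r => r.reverse == a) = decide (a.map rotChar = a.reverse.map some) := by
    cases h : buildRot a with
    | none =>
      symm
      rw [decide_eq_false_iff_not]
      intro heq
      have : buildRot a = some a.reverse := (buildRot_eq_some a a.reverse).mpr heq
      simp [h] at this
    | some r =>
      have hmap := (buildRot_eq_some a r).mp h
      rcases Bool.eq_false_or_eq_true (r.reverse == a) with hr | hr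
      · show (r.reverse == a) = _
        rw [hr]
        symm
        rw [decide_eq_true_iff]
        have : r = a.reverse := by
          have := beq_iff_eq.mp hr
          rw [← this]; simp
        rw [hmap, this]
      · show (r.reverse == a) = _
        rw [hr]
        symm
        rw [decide_eq_false_iff_not]
        intro heq
        have hr' : r = a.reverse := by
          have h2 : r.map some = (a.reverse).map some := by rw [← hmap, heq]
          exact List.map_injective_iff.mpr (fun _ _ => by simp) h2
        subst hr'
        simp at hr
  rw [hA, hB]

-- ===== VERDICT (by name: the statement is the Claim_ definition above) =====
theorem rotatable_spec : Claim_equal_rotatable := by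
  intro x _
  unfold Spec_rotatable rotatable rotatable_alt
  exact key ((PySem.Int.toStr x).toList)
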